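-- pv_equiv track=rewrite | github.com/timrprobocom/advent-of-code | 2023/day02.py | part2
-- ===== SOURCE A (Python) =====
-- def part2(record):
--     sumx = 0
--     for data in record.values():
--         cnt = [0,0,0]
--         for row in data:
--             cnt = [max(c,r) for c,r in zip(cnt,row)]
--         power = cnt[0]*cnt[1]*cnt[2]
--         sumx += power
--     return sumx
-- ===== SOURCE B (Python) =====
-- def part2(record):
--     # Column-wise: for each game multiply the per-colour column maxima
--     # (seeded with 0, as A's running max starts at 0) instead of folding
--     # a running [max,max,max] list over the rows.
--     total = 0
--     for data in record.values():
--         power = 1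
--         for i in range(3):
--             power *= max([0] + [row[i] for row in data])
--         total += power
--     return total
-- ===== Notes on version B (the rewrite author's own statement) =====
-- stated objective: idiomatic
-- what changed: Per game, B computes each colour's maximum by a separate column scan (max over [0]+column for i in 0..2) and multiplies the three maxima, instead of A's row-wise fold of a running three-element max list built with zip; an empty game naturally yields 0 since each column max is 0.
import Mathlib
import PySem

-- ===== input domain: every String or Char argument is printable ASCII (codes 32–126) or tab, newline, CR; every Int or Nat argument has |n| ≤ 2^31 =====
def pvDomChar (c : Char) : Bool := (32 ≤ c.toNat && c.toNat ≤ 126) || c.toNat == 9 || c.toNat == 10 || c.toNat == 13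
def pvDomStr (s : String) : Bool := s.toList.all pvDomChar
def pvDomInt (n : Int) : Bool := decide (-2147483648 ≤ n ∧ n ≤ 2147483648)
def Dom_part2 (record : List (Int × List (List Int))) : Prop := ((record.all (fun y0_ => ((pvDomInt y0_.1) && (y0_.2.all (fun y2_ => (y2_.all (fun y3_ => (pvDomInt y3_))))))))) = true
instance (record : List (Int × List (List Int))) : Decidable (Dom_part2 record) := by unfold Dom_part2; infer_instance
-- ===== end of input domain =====

-- B computes each game's power as a product of three column maxima instead of A's
-- row-wise running-max fold; same return value on every input where A returns.

-- ===== PORT A =====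
def part2 (record : List (Int × List (List Int))) : Int :=
  record.foldl (fun sumx kv =>
    let cnt := kv.2.foldl (fun cnt row => (cnt.zip row).map (fun p => max p.1 p.2)) [0, 0, 0]
    -- cnt[0]*cnt[1]*cnt[2]; under Pre_ every row has length ≥ 3, so cnt keeps length 3
    sumx + PySem.List.pyGetD cnt 0 0 * PySem.List.pyGetD cnt 1 0 * PySem.List.pyGetD cnt 2 0) 0

-- ===== PORT B =====
def part2_alt (record : List (Int × List (List Int))) : Int :=
  record.foldl (fun total kv =>
    total + (PySem.List.pyRange 0 3 1).foldl (fun power i =>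
      -- max([0] + [row[i] for row in data])
      power * ((kv.2.map (fun row => PySem.List.pyGetD row i 0)).foldl max 0)) 1) 0

-- ===== PRECONDITION & SPEC =====
-- Pre_ excludes exactly the inputs on which Python A raises IndexError: a game with a
-- row shorter than 3 (zip shrinks cnt, then cnt[2] fails; B's row[i] fails likewise).
def Pre_part2 (record : List (Int × List (List Int))) : Prop :=
  ∀ kv ∈ record, ∀ row ∈ kv.2, 3 ≤ row.length

instance (record : List (Int × List (List Int))) : Decidable (Pre_part2 record) := by
  unfold Pre_part2; infer_instance

def pvWitness_part2 : (List (Int × List (List Int))) := [(1, [[1, 2, 3], [4, 0, 1]]), (2, [])]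

def Spec_part2 (record : List (Int × List (List Int))) (out : Int) : Prop := out = part2_alt record
instance (record : List (Int × List (List Int))) (out : Int) : Decidable (Spec_part2 record out) := by unfold Spec_part2; infer_instance

-- ===== CLAIM (what is proved, stated in full; the proofs are below) =====
def Claim_equal_part2 : Prop := ∀ (record : List (Int × List (List Int))), Dom_part2 record → Pre_part2 record → Spec_part2 record (part2 record)

-- ===== LEMMAS AND PROOFS =====

-- column running max, the common form both per-game values reduce to
def colMax (data : List (List Int)) (i : Int) (init : Int) : Int :=
  data.foldl (fun m row => max m (PySem.List.pyGetD row i 0)) init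

theorem cnt_eq (data : List (List Int)) (h : ∀ row ∈ data, 3 ≤ row.length) :
    ∀ a b c : Int,
      data.foldl (fun cnt row => (cnt.zip row).map (fun p => max p.1 p.2)) [a, b, c]
        = [colMax data 0 a, colMax data 1 b, colMax data 2 c] := by
  induction data with
  | nil => intro a b c; simp [colMax]
  | cons row rest ih =>
    intro a b c
    obtain ⟨r0, r1, r2, t, rfl⟩ : ∃ r0 r1 r2 t, row = r0 :: r1 :: r2 :: t := by
      match row, h row (by simp) with
      | r0 :: r1 :: r2 :: t, _ => exact ⟨r0, r1, r2, t, rfl⟩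
    have hr : ∀ r ∈ rest, 3 ≤ r.length := fun r hr => h r (by simp [hr])
    have hz : (([a, b, c].zip (r0 :: r1 :: r2 :: t)).map (fun p => max p.1 p.2))
        = [max a r0, max b r1, max c r2] := rfl
    rw [List.foldl_cons, hz, ih hr (max a r0) (max b r1) (max c r2)]
    have h0 : PySem.List.pyGetD (r0 :: r1 :: r2 :: t) 0 0 = r0 := by simp [pysem]
    have h1 : PySem.List.pyGetD (r0 :: r1 :: r2 :: t) 1 0 = r1 := by simp [pysem]
    have h2 : PySem.List.pyGetD (r0 :: r1 :: r2 :: t) 2 0 = r2 := by simp [pysem]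
    simp [colMax, h0, h1, h2]

theorem game_eq (data : List (List Int)) (h : ∀ row ∈ data, 3 ≤ row.length) :
    (let cnt := data.foldl (fun cnt row => (cnt.zip row).map (fun p => max p.1 p.2)) [0, 0, 0]
     PySem.List.pyGetD cnt 0 0 * PySem.List.pyGetD cnt 1 0 * PySem.List.pyGetD cnt 2 0)
      = (PySem.List.pyRange 0 3 1).foldl (fun power i =>
          power * ((data.map (fun row => PySem.List.pyGetD row i 0)).foldl max 0)) 1 := by
  have hrange : PySem.List.pyRange 0 3 1 = [0, 1, 2] := by decide
  rw [cnt_eq data h 0 0 0, hrange]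
  simp [PySem.List.pyGetD, List.foldl_map, colMax]

theorem part2_spec' (record : List (Int × List (List Int))) (hpre : Pre_part2 record) :
    part2 record = part2_alt record := by
  unfold part2 part2_alt
  apply PySem.List.foldl_congr_mem
  intro acc kv hmem
  simp only
  rw [game_eq kv.2 (hpre kv hmem)]

-- ===== VERDICT (by name: the statement is the Claim_ definition above) =====
theorem part2_spec : Claim_equal_part2 := by
  intro record _ hpre
  unfold Spec_part2
  exact part2_spec' record hpre
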